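-- pv_equiv track=rewrite | github.com/ranjeetds/SheetMind | src/nlp/command_processor.py | _extract_analyze_params
-- ===== SOURCE A (Python) =====
-- from typing import Any, Dict, List, Optional, Union
--
-- def _extract_analyze_params(query: str) -> Dict[str, Any]:
--     """Extract parameters for analysis operations."""
--     params = {}
--
--     if "correlation" in query:
--         params["analysis_type"] = "correlation"
--     elif any(word in query for word in ["trend", "pattern"]):
--         params["analysis_type"] = "trend"
--     elif any(word in query for word in ["summary", "overview"]):
--         params["analysis_type"] = "summary"
--     elif "statistics" in query or "stats" in query:
--         params["analysis_type"] = "statistics"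
--
--     return params
-- ===== SOURCE B (Python) =====
-- from typing import Any, Dict
--
-- # rank of each keyword (lower rank = higher priority); rank -> label
-- _RANK = {"correlation": 0, "trend": 1, "pattern": 1, "summary": 2,
--          "overview": 2, "statistics": 3, "stats": 3}
-- _LABELS = ["correlation", "trend", "summary", "statistics"]
--
-- def _extract_analyze_params(query: str) -> Dict[str, Any]:
--     """Extract parameters for analysis operations.
--
--     Collect the ranks of ALL keywords occurring in the query, then select
--     the label of the minimal rank (no branch chain, no short-circuit)."""
--     hits = {rank for kw, rank in _RANK.items() if kw in query}
--     if not hits: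
--         return {}
--     return {"analysis_type": _LABELS[min(hits)]}
-- ===== Notes on version B (the rewrite author's own statement) =====
-- stated objective: alternative
-- what changed: A short-circuits a fixed if/elif chain; B unconditionally tests all seven keywords, collects the set of priority ranks of those present, and selects the label of the minimal rank.
import Mathlib
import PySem

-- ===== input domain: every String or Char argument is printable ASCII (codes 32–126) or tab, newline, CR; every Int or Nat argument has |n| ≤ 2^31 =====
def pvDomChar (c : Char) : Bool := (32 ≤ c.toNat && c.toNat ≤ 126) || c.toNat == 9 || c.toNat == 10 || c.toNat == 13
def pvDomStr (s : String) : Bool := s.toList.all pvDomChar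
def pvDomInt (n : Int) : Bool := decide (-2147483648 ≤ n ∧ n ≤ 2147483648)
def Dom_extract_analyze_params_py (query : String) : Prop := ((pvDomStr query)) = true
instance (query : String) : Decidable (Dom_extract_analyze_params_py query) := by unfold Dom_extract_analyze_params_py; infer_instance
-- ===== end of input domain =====

-- B replaces A's short-circuiting if/elif chain by collecting the ranks of all matching keywords and taking the minimum rank's label (alternative decomposition; return value only).


-- ===== PORT A =====
-- literal port of A: empty dict, then the if/elif chain inserting "analysis_type"
def extract_analyze_params_py (query : String) : List (String × String) :=
  let params : PySem.Dict String String := PySem.Dict.empty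
  (if PySem.Str.isIn "correlation" query then
    params.insert "analysis_type" "correlation"
  else if ["trend", "pattern"].any (fun w => PySem.Str.isIn w query) then
    params.insert "analysis_type" "trend"
  else if ["summary", "overview"].any (fun w => PySem.Str.isIn w query) then
    params.insert "analysis_type" "summary"
  else if PySem.Str.isIn "statistics" query || PySem.Str.isIn "stats" query then
    params.insert "analysis_type" "statistics"
  else
    params).items

-- ===== PORT B =====
-- port of B: rank of each keyword, labels indexed by rank
def pvRank_extract_analyze_params_py : List (String × Nat) :=
  [("correlation", 0), ("trend", 1), ("pattern", 1), ("summary", 2),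
   ("overview", 2), ("statistics", 3), ("stats", 3)]

def pvLabels_extract_analyze_params_py : List String :=
  ["correlation", "trend", "summary", "statistics"]

-- Source B's set comprehension of ranks, then min; List.min? is the minimum of that (finite Nat) set
def extract_analyze_params_py_alt (query : String) : List (String × String) :=
  let hits :=
    (pvRank_extract_analyze_params_py.filter (fun kr => PySem.Str.isIn kr.1 query)).map (·.2)
  match hits.min? with
  | none => []
  | some m => [("analysis_type", pvLabels_extract_analyze_params_py.getD m "")]

-- ===== PRECONDITION & SPEC =====
def Spec_extract_analyze_params_py (query : String) (out : List (String × String)) : Prop := out = extract_analyze_params_py_alt query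
instance (query : String) (out : List (String × String)) : Decidable (Spec_extract_analyze_params_py query out) := by unfold Spec_extract_analyze_params_py; infer_instance

-- ===== CLAIM (what is proved, stated in full; the proofs are below) =====
def Claim_equal_extract_analyze_params_py : Prop := ∀ (query : String), Dom_extract_analyze_params_py query → Spec_extract_analyze_params_py query (extract_analyze_params_py query)

-- ===== LEMMAS AND PROOFS =====

-- ===== VERDICT (by name: the statement is the Claim_ definition above) =====
theorem extract_analyze_params_py_spec : Claim_equal_extract_analyze_params_py := by
  intro query _
  unfold Spec_extract_analyze_params_py extract_analyze_params_py extract_analyze_params_py_alt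
    pvRank_extract_analyze_params_py pvLabels_extract_analyze_params_py
  simp only [List.any_cons, List.any_nil, Bool.or_false, List.filter_cons, List.filter_nil]
  generalize PySem.Str.isIn "correlation" query = b1
  generalize PySem.Str.isIn "trend" query = b2
  generalize PySem.Str.isIn "pattern" query = b3
  generalize PySem.Str.isIn "summary" query = b4
  generalize PySem.Str.isIn "overview" query = b5
  generalize PySem.Str.isIn "statistics" query = b6
  generalize PySem.Str.isIn "stats" query = b7
  revert b1 b2 b3 b4 b5 b6 b7
  decide
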